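-- pv_equiv track=rewrite | github.com/libmatcha/idea | matcha/lexer.py | _parse_literals
-- ===== SOURCE A (Python) =====
-- def _parse_literals(range_str: str) -> list[str]:
--     """
--     Parse literal strings from backtick-delimited format.
--
--     Example: `black`|`WHITE` -> ["black", "WHITE"]
--     """
--     literals = []
--     i = 0
--
--     while i < len(range_str):
--         if range_str[i] == '`':
--             # Find closing backtick
--             end = range_str.find('`', i + 1)
--             if end == -1:
--                 # Unclosed backtick, treat rest as literal
--                 literals.append(range_str[i + 1:])
--                 break
--             literals.append(range_str[i + 1:end])
--             i = end + 1
--         elif range_str[i] == '|':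
--             i += 1
--         else:
--             i += 1
--
--     return literals if literals else None
-- ===== SOURCE B (Python) =====
-- def _parse_literals(range_str: str) -> list[str]:
--     literals = range_str.split('`')[1::2]
--     return literals if literals else None
-- ===== Notes on version B (the rewrite author's own statement) =====
-- stated objective: faster
-- what changed: Replaced the manual index/find/slice scanning loop with a single str.split on the backtick character followed by taking the odd-indexed segments with a stride slice.
import Mathlib
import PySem

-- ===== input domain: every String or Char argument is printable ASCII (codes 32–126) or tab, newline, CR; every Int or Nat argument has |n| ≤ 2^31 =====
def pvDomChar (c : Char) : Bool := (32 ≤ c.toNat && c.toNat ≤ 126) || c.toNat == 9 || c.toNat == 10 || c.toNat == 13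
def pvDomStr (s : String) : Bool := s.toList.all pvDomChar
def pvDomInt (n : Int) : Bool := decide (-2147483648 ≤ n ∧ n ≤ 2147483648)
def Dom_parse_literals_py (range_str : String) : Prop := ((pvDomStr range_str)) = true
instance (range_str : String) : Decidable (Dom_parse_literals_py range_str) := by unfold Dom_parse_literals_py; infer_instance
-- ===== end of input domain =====

-- B replaces A's manual index/find scanning loop with one split on '`' plus taking the odd-indexed
-- segments; same O(n), measured constant-factor speedup. Equivalence on the full domain (no Pre_ needed).

-- ===== PORT A =====
-- A's while-loop over index i, ported with the remaining suffix standing for position i: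
-- range_str.find('`', i+1) is PySem.Chars.find on the suffix after the opening backtick,
-- range_str[i+1:end] / range_str[i+1:] are take/drop on that suffix.
def pvLoopA : List Char → List String → List String
  | [], acc => acc
  | c :: rest, acc =>
    if c = '`' then
      -- end = range_str.find('`', i + 1)
      let endIdx : Int := PySem.Chars.find rest ['`']
      if endIdx = -1 then
        -- unclosed backtick: literals.append(range_str[i+1:]); break
        acc ++ [String.ofList rest]
      else
        -- literals.append(range_str[i+1:end]); i = end + 1
        pvLoopA (rest.drop (endIdx.toNat + 1)) (acc ++ [String.ofList (rest.take endIdx.toNat)])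
    else
      -- the '|' branch and the default branch both do i += 1
      pvLoopA rest acc
termination_by cs => cs.length
decreasing_by all_goals simp [List.length_drop]

def parse_literals_py (range_str : String) : Option (List String) :=
  let literals := pvLoopA range_str.toList []
  if literals = [] then none else some literals

-- ===== PORT B =====
def parse_literals_py_alt (range_str : String) : Option (List String) :=
  -- literals = range_str.split('`')[1::2]
  match PySem.Str.split? range_str "`" with
  | none => none          -- unreachable: the separator "`" is non-empty
  | some parts =>
    match PySem.List.slice? parts (some 1) none 2 with
    | none => none        -- unreachable: the step 2 is non-zero
    | some literals => if literals = [] then none else some literals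

-- ===== PRECONDITION & SPEC =====
def Spec_parse_literals_py (range_str : String) (out : Option (List String)) : Prop := out = parse_literals_py_alt range_str
instance (range_str : String) (out : Option (List String)) : Decidable (Spec_parse_literals_py range_str out) := by unfold Spec_parse_literals_py; infer_instance

-- ===== CLAIM (what is proved, stated in full; the proofs are below) =====
def Claim_equal_parse_literals_py : Prop := ∀ (range_str : String), Dom_parse_literals_py range_str → Spec_parse_literals_py range_str (parse_literals_py range_str)

-- ===== LEMMAS AND PROOFS =====

-- the odd-indexed elements of a list (what xs[1::2] selects)
def pvOdds {α : Type} : List α → List α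
  | [] => []
  | [_] => []
  | _ :: b :: t => b :: pvOdds t

-- reference form of splitting the character list on '`'
def pvSplitBT : List Char → List (List Char)
  | [] => [[]]
  | c :: t => if c = '`' then [] :: pvSplitBT t else (pvSplitBT t).modifyHead (c :: ·)

lemma pvGo_eq (fuel : Nat) : ∀ (l cur : List Char) (accs : List (List Char)), l.length ≤ fuel →
    PySem.Chars.splitOn.go ['`'] fuel l cur accs = accs.reverse ++ (pvSplitBT l).modifyHead (cur.reverse ++ ·) := by
  induction fuel with
  | zero =>
    intro l cur accs h
    have : l = [] := by cases l <;> simp_all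
    subst this
    simp [PySem.Chars.splitOn.go, pvSplitBT]
  | succ n ih =>
    intro l cur accs h
    match l with
    | [] => simp [PySem.Chars.splitOn.go, pvSplitBT]
    | c :: rest =>
      rw [PySem.Chars.splitOn.go]
      by_cases hc : c = '`'
      · subst hc
        rw [if_pos (by simp [List.isPrefixOf])]
        rw [show List.drop ['`'].length ('`' :: rest) = rest from rfl]
        rw [ih rest [] _ (by simpa using h)]
        simp only [pvSplitBT, List.reverse_cons, List.reverse_nil, List.nil_append]
        cases pvSplitBT rest <;> simp
      · rw [if_neg (by simp [List.isPrefixOf, Ne.symm hc])]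
        rw [ih rest (c :: cur) accs (by simpa using h)]
        simp only [pvSplitBT, if_neg hc, List.modifyHead_modifyHead]
        congr 1
        cases pvSplitBT rest <;> simp

lemma pvSplitOn_eq (l : List Char) : PySem.Chars.splitOn l ['`'] = pvSplitBT l := by
  rw [PySem.Chars.splitOn, pvGo_eq (l.length + 1) l [] [] (by omega)]
  cases pvSplitBT l <;> simp

lemma pvSplitBT_no_bt {l : List Char} (h : '`' ∉ l) : pvSplitBT l = [l] := by
  induction l with
  | nil => rfl
  | cons c t ih =>
    simp only [List.mem_cons, not_or] at h
    simp [pvSplitBT, Ne.symm h.1, ih h.2, List.modifyHead]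

lemma pvSplitBT_append {a : List Char} (b : List Char) (h : '`' ∉ a) :
    pvSplitBT (a ++ '`' :: b) = a :: pvSplitBT b := by
  induction a with
  | nil => simp [pvSplitBT]
  | cons c t ih =>
    simp only [List.mem_cons, not_or] at h
    simp [pvSplitBT, Ne.symm h.1, ih h.2, List.modifyHead]

lemma pvOdds_modifyHead {α : Type} (f : α → α) (l : List α) : pvOdds (l.modifyHead f) = pvOdds l := by
  match l with
  | [] => rfl
  | [_] => rfl
  | _ :: _ :: _ => rfl

-- decomposition of the scanned suffix at the first backtick found

lemma pvOdds_map {α β : Type} (f : α → β) : ∀ (l : List α), pvOdds (l.map f) = (pvOdds l).map f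
  | [] => rfl
  | [_] => rfl
  | a :: b :: t => by simp [pvOdds, pvOdds_map f t]

lemma pvFind_decomp {rest : List Char} (h : PySem.Chars.find rest ['`'] ≠ -1) :
    let j := (PySem.Chars.find rest ['`']).toNat
    rest = rest.take j ++ '`' :: rest.drop (j + 1) ∧ '`' ∉ rest.take j := by
  intro j
  have hnn : 0 ≤ PySem.Chars.find rest ['`'] := by
    have := PySem.Chars.neg_one_le_find rest ['`']
    omega
  obtain ⟨hpre, hmin⟩ := PySem.Chars.find_spec (s := rest) (sub := ['`']) hnn
  have hle := PySem.Chars.find_le_length rest ['`']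
  have hj : j < rest.length := by
    rcases Nat.lt_or_ge j rest.length with h' | h'
    · exact h'
    · exfalso
      have : rest.drop j = [] := List.drop_eq_nil_of_le h'
      rw [this] at hpre
      simp at hpre
  constructor
  · obtain ⟨t, ht⟩ := hpre
    rw [List.drop_eq_getElem_cons hj] at ht
    simp only [List.singleton_append] at ht
    conv_lhs => rw [← List.take_append_drop j rest]
    congr 1
    rw [List.drop_eq_getElem_cons hj, ← (List.cons.injEq ..).mp ht |>.1]
  · intro hmem
    obtain ⟨i, hi, hgi⟩ := List.mem_iff_getElem.mp hmem
    rw [List.length_take] at hi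
    have hilen : i < rest.length := by omega
    have hi' : i < j := by omega
    apply hmin i hi'
    rw [List.drop_eq_getElem_cons hilen]
    have hri : rest[i] = '`' := by rw [← List.getElem_take (xs := rest) (j := j)] <;> simp_all
    rw [hri]
    exact ⟨_, rfl⟩

lemma pvLoopA_eq : ∀ (cs : List Char) (acc : List String),
    pvLoopA cs acc = acc ++ (pvOdds (pvSplitBT cs)).map String.ofList := by
  intro cs acc
  induction cs, acc using pvLoopA.induct with
  | case1 acc => simp [pvLoopA, pvSplitBT, pvOdds]
  | case2 rest acc endIdx hend =>
    rw [pvLoopA]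
    simp only [if_true, if_pos (show PySem.Chars.find rest ['`'] = -1 from hend)]
    have hno : '`' ∉ rest := by
      have := (PySem.Chars.find_eq_neg_one_iff (s := rest) (sub := ['`'])).mp hend
      simpa [List.singleton_infix_iff] using this
    simp [pvSplitBT, pvSplitBT_no_bt hno, pvOdds]
  | case3 rest acc endIdx hend ih =>
    rw [pvLoopA]
    simp only [if_true, if_neg (show ¬ PySem.Chars.find rest ['`'] = -1 from hend)]
    obtain ⟨hdec, hno⟩ := pvFind_decomp hend
    rw [ih]
    conv_rhs => rw [show pvSplitBT ('`' :: rest) = [] :: pvSplitBT rest from by simp [pvSplitBT], hdec]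
    rw [pvSplitBT_append _ hno]
    simp only [pvOdds, List.map_cons, List.append_assoc, List.singleton_append]
    rfl
  | case4 c rest acc hc ih =>
    rw [pvLoopA]
    simp only [if_neg hc]
    rw [ih]
    simp [pvSplitBT, if_neg hc, pvOdds_modifyHead]

lemma pvFilterMap_odds {α : Type} : ∀ (xs : List α),
    (List.range (xs.length / 2)).filterMap (fun (k : Nat) => xs[((1:Int) + 2 * (k:Int)).toNat]?) = pvOdds xs := by
  intro xs
  induction xs using pvOdds.induct with
  | case1 => simp [pvOdds]
  | case2 a => simp [pvOdds]
  | case3 a b t ih =>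
    have hlen : (a :: b :: t).length / 2 = t.length / 2 + 1 := by simp only [List.length_cons]; omega
    rw [hlen, List.range_succ_eq_map]
    simp only [List.filterMap_cons, List.filterMap_map]
    have h0 : ((1:Int) + 2 * ((0:Nat):Int)).toNat = 1 := by norm_num
    have hfun : ∀ k : Nat, (a :: b :: t)[((1:Int) + 2 * ((k+1:Nat):Int)).toNat]? = t[((1:Int) + 2 * (k:Int)).toNat]? := by
      intro k
      have : ((1:Int) + 2 * ((k+1:Nat):Int)).toNat = ((1:Int) + 2 * (k:Int)).toNat + 2 := by push_cast; omega
      rw [this]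
      simp
    simp only [h0, Function.comp_def, hfun]
    simp [pvOdds, ih]

lemma pvSlice2_eq {α : Type} (xs : List α) : PySem.List.slice? xs (some 1) none 2 = some (pvOdds xs) := by
  match xs with
  | [] => rfl
  | x :: t =>
    rw [PySem.List.slice?]
    rw [if_neg (by norm_num)]
    have hidx : PySem.List.sliceIndices (x :: t).length (some 1) none 2 = (1, ((x::t).length : Int), 2) := by
      simp [PySem.List.sliceIndices]
    rw [hidx]
    have hcount : (if (1:Int) < ((x::t).length:Int) then ((((x::t).length:Int) - 1 + 2 - 1) / 2).toNat else 0) = (x::t).length / 2 := by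
      by_cases h1 : (1:Int) < ((x::t).length:Int)
      · rw [if_pos h1]; omega
      · rw [if_neg h1]
        have : (x::t).length = 1 := by simp at h1 ⊢; omega
        omega
    simp only [show ((0:Int) < 2) = True from by norm_num, if_true]
    rw [hcount]
    rw [pvFilterMap_odds]

-- ===== VERDICT (by name: the statement is the Claim_ definition above) =====
theorem parse_literals_py_spec : Claim_equal_parse_literals_py := by
  intro s _
  unfold Spec_parse_literals_py parse_literals_py parse_literals_py_alt
  have hsplit : PySem.Str.split? s "`" = some ((pvSplitBT s.toList).map String.ofList) := by
    simp [PySem.Str.split?, PySem.Chars.split?, pvSplitOn_eq]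
  rw [hsplit]
  simp only [pvSlice2_eq, pvLoopA_eq, pvOdds_map]
  simp
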